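-- pv_equiv track=rewrite | github.com/lauraguzeljblatnik/2048 | model2048.py | stisni_vrstico_levo
-- ===== SOURCE A (Python) =====
-- def stisni_vrstico_levo(A):
-- #vse elemente v vrsrici stisne v levo
--     B = []
--     for i in range(len(A)):
--         if A[i] != 0:
--             B += [A[i]]
--     if B == []:
--         B = B
--     elif len(B) == 1:
--         B = B
--     elif B[0] != B[1]:
--         B = [B[0]] + stisni_vrstico_levo(B[1:])
--     elif B[0] == B[1]:
--         B = [2*B[0]] + stisni_vrstico_levo(B[2:])
--     nicle = len(A) - len(B)
--     return B + nicle*[0]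
-- ===== SOURCE B (Python) =====
-- def stisni_vrstico_levo(A):
--     # single linear pass: compact nonzeros while merging adjacent equal pairs, then pad with zeros
--     out = []
--     prev = None
--     for x in A:
--         if x == 0:
--             continue
--         if prev is None:
--             prev = x
--         elif prev == x:
--             out.append(2 * x)
--             prev = None
--         else:
--             out.append(prev)
--             prev = x
--     if prev is not None:
--         out.append(prev)
--     return out + [0] * (len(A) - len(out))
-- ===== Notes on version B (the rewrite author's own statement) =====
-- stated objective: faster
-- what changed: Replaces A's recursion (which re-filters and re-slices the remaining row on every merge step, O(n^2)) with a single left-to-right pass keeping one pending tile, then pads zeros once.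
import Mathlib
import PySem

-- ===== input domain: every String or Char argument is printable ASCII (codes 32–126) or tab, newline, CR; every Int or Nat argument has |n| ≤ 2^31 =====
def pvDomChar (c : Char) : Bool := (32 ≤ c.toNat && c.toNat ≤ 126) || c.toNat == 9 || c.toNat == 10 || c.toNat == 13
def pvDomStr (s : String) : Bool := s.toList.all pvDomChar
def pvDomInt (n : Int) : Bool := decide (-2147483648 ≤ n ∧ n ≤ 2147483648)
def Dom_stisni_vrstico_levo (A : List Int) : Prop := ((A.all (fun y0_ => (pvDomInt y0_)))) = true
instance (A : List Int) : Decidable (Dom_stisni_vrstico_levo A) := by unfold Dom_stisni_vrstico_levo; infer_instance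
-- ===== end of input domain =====

-- B replaces A's re-filtering recursion by one linear merging pass; measured asymptotically faster (O(n) vs O(n^2)).


-- ===== PORT A =====
-- the filtering for-loop 'for i in range(len(A)): if A[i] != 0: B += [A[i]]' (reads A[i] in index order = fold over A)
def pvNonzeros (A : List Int) : List Int :=
  A.foldl (fun acc x => if x ≠ 0 then acc ++ [x] else acc) []

-- termination helper for the port (cited in decreasing_by)
theorem pvFoldLen_le (A : List Int) : (pvNonzeros A).length ≤ A.length := by
  rw [pvNonzeros, PySem.List.foldl_append_ite_eq_filter]
  simpa using A.length_filter_le _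

-- the for-loop over range(len(A)) reads A[i] in order, so it is the fold over A itself;
-- B[1:]/B[2:] are PySem.List.slice; nicle*[0] with nicle = len(A)-len(B) ≥ 0 is List.replicate (Nat subtraction)
def stisni_vrstico_levo (A : List Int) : List Int :=
  let B := pvNonzeros A
  let B2 :=
    if B = [] then B
    else if B.length = 1 then B
    else if PySem.List.pyGetD B 0 0 ≠ PySem.List.pyGetD B 1 0 then
      [PySem.List.pyGetD B 0 0] ++ stisni_vrstico_levo (PySem.List.slice B (some 1) none)
    else
      [2 * PySem.List.pyGetD B 0 0] ++ stisni_vrstico_levo (PySem.List.slice B (some 2) none)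
  B2 ++ List.replicate (A.length - B2.length) 0
termination_by A.length
decreasing_by
  all_goals
    rename_i hne _ _
    have hle := pvFoldLen_le A
    have hpos : 0 < (pvNonzeros A).length := List.length_pos_iff.mpr hne
    first
      | (rw [PySem.List.slice_from_one]; simp only [List.length_tail]; omega)
      | (rw [show PySem.List.slice (pvNonzeros A) (some 2) none = (pvNonzeros A).drop 2 by
            simpa using PySem.List.slice_from_natCast (pvNonzeros A) 2];
         simp only [List.length_drop]; omega)

-- ===== PORT B =====
def stisni_vrstico_levo_alt (A : List Int) : List Int :=
  let s := A.foldl (fun (s : List Int × Option Int) x =>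
      if x = 0 then s
      else match s.2 with
        | none => (s.1, some x)
        | some p => if p = x then (s.1 ++ [2 * x], none) else (s.1 ++ [p], some x))
    ([], none)
  let out := match s.2 with
    | some p => s.1 ++ [p]
    | none => s.1
  out ++ List.replicate (A.length - out.length) 0

-- ===== PRECONDITION & SPEC =====
def Spec_stisni_vrstico_levo (A : List Int) (out : List Int) : Prop := out = stisni_vrstico_levo_alt A
instance (A : List Int) (out : List Int) : Decidable (Spec_stisni_vrstico_levo A out) := by unfold Spec_stisni_vrstico_levo; infer_instance

-- ===== CLAIM (what is proved, stated in full; the proofs are below) =====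
def Claim_equal_stisni_vrstico_levo : Prop := ∀ (A : List Int), Dom_stisni_vrstico_levo A → Spec_stisni_vrstico_levo A (stisni_vrstico_levo A)

-- ===== LEMMAS AND PROOFS =====

-- the common mathematical description: merge adjacent equal pairs of a (zero-free) row, left to right
def pvMerge : List Int → List Int
  | [] => []
  | [a] => [a]
  | a :: b :: t => if a = b then (2 * a) :: pvMerge t else a :: pvMerge (b :: t)

theorem pvMerge_length_le (L : List Int) : (pvMerge L).length ≤ L.length := by
  induction L using pvMerge.induct <;> simp_all [pvMerge] <;> omega

theorem pvNonzeros_eq_filter (A : List Int) :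
    pvNonzeros A = A.filter (fun x => decide (x ≠ 0)) := by
  rw [pvNonzeros, PySem.List.foldl_append_ite_eq_filter]
  simp

theorem pvNonzeros_of_all_ne (L : List Int) (h : ∀ x ∈ L, x ≠ 0) : pvNonzeros L = L := by
  rw [pvNonzeros_eq_filter]
  exact List.filter_eq_self.mpr (fun x hx => by simpa using h x hx)

-- A computes pvMerge of the nonzeros, padded with zeros to the input length
theorem stisni_eq (A : List Int) :
    stisni_vrstico_levo A =
      pvMerge (pvNonzeros A) ++
        List.replicate (A.length - (pvMerge (pvNonzeros A)).length) 0 := by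
  induction hn : A.length using Nat.strong_induction_on generalizing A with
  | _ n IH =>
  subst hn
  rw [stisni_vrstico_levo.eq_def]
  rcases hB : pvNonzeros A with _ | ⟨a, _ | ⟨b, t⟩⟩
  · simp [pvMerge]
  · simp [pvMerge]
  · have hmem : ∀ x ∈ (a :: b :: t : List Int), x ≠ 0 := by
      rw [← hB, pvNonzeros_eq_filter]
      intro x hx; simpa using (List.mem_filter.mp hx).2
    have hlenA : t.length + 2 ≤ A.length := by
      have := pvFoldLen_le A; rw [hB] at this; simpa using this
    have hgd0 : PySem.List.pyGetD (a :: b :: t : List Int) 0 0 = a := by simp [pysem]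
    have hgd1 : PySem.List.pyGetD (a :: b :: t : List Int) 1 0 = b := by simp [pysem]
    have hs1 : PySem.List.slice (a :: b :: t : List Int) (some 1) none = b :: t := by
      rw [PySem.List.slice_from_one]; rfl
    have hs2 : PySem.List.slice (a :: b :: t : List Int) (some 2) none = t := by
      simpa using PySem.List.slice_from_natCast (a :: b :: t : List Int) 2
    have hmt := pvMerge_length_le (b :: t)
    have hmt2 := pvMerge_length_le t
    by_cases hab : a = b
    · have hrec := IH t.length (by omega) t rfl
      have hnz : pvNonzeros t = t :=
        pvNonzeros_of_all_ne t (fun x hx => hmem x (by simp [hx]))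
      rw [hnz] at hrec
      simp only [hgd0, hgd1, hs1, hs2, hrec, pvMerge, if_pos hab]
      simp [hab, List.append_assoc, ← List.replicate_add]
      omega
    · have hrec := IH (t.length + 1) (by omega) (b :: t) rfl
      have hnz : pvNonzeros (b :: t) = b :: t :=
        pvNonzeros_of_all_ne (b :: t) (fun x hx => hmem x (by simp [hx]))
      rw [hnz] at hrec
      simp only [hgd0, hgd1, hs1, hs2, hrec, pvMerge, if_neg hab]
      simp only [List.length_cons] at hmt
      simp [hab, List.append_assoc, ← List.replicate_add]
      omega

-- B's loop, flushed, computes pvMerge (pending tile prepended)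
theorem alt_loop (L : List Int) (out : List Int) (prev : Option Int) (h : ∀ x ∈ L, x ≠ 0) :
    (match (L.foldl (fun (s : List Int × Option Int) x =>
      if x = 0 then s
      else match s.2 with
        | none => (s.1, some x)
        | some p => if p = x then (s.1 ++ [2 * x], none) else (s.1 ++ [p], some x))
      (out, prev)).2 with
     | some p => (L.foldl (fun (s : List Int × Option Int) x =>
      if x = 0 then s
      else match s.2 with
        | none => (s.1, some x)
        | some p => if p = x then (s.1 ++ [2 * x], none) else (s.1 ++ [p], some x))
      (out, prev)).1 ++ [p]
     | none => (L.foldl (fun (s : List Int × Option Int) x =>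
      if x = 0 then s
      else match s.2 with
        | none => (s.1, some x)
        | some p => if p = x then (s.1 ++ [2 * x], none) else (s.1 ++ [p], some x))
      (out, prev)).1) = out ++ pvMerge (prev.toList ++ L) := by
  induction L generalizing out prev with
  | nil => cases prev <;> simp [pvMerge]
  | cons x t ih =>
    have hx : x ≠ 0 := h x (by simp)
    have ht : ∀ y ∈ t, y ≠ 0 := fun y hy => h y (by simp [hy])
    simp only [List.foldl_cons, if_neg hx]
    cases prev with
    | none =>
      simpa [pvMerge] using ih out (some x) ht
    | some p =>
      dsimp only
      by_cases hpx : p = x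
      · subst hpx
        have := ih (out ++ [2 * p]) none ht
        rw [if_pos rfl]
        rw [this]
        cases t <;> simp [pvMerge]
      · have := ih (out ++ [p]) (some x) ht
        simp only [if_neg hpx]
        rw [this]
        simp [pvMerge, hpx]

theorem foldl_skip_zeros (L : List Int) (s : List Int × Option Int) :
    L.foldl (fun (s : List Int × Option Int) x =>
      if x = 0 then s
      else match s.2 with
        | none => (s.1, some x)
        | some p => if p = x then (s.1 ++ [2 * x], none) else (s.1 ++ [p], some x)) s
    = (L.filter (fun x => decide (x ≠ 0))).foldl (fun (s : List Int × Option Int) x =>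
      if x = 0 then s
      else match s.2 with
        | none => (s.1, some x)
        | some p => if p = x then (s.1 ++ [2 * x], none) else (s.1 ++ [p], some x)) s := by
  induction L generalizing s with
  | nil => rfl
  | cons x t ih => by_cases hx : x = 0 <;> simp [hx, ih]

theorem alt_eq (A : List Int) :
    stisni_vrstico_levo_alt A =
      pvMerge (pvNonzeros A) ++
        List.replicate (A.length - (pvMerge (pvNonzeros A)).length) 0 := by
  simp only [stisni_vrstico_levo_alt]
  rw [foldl_skip_zeros]
  rw [alt_loop (A.filter (fun x => decide (x ≠ 0))) [] none
      (fun x hx => by simpa using (List.mem_filter.mp hx).2)]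
  rw [pvNonzeros_eq_filter]
  simp

-- ===== VERDICT (by name: the statement is the Claim_ definition above) =====
theorem stisni_vrstico_levo_spec : Claim_equal_stisni_vrstico_levo := by
  intro A _
  unfold Spec_stisni_vrstico_levo
  rw [stisni_eq, alt_eq]
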